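-- pv_equiv track=rewrite | github.com/SEONMl/Solutions | venv/Category/Challenge/2023EleventhMarket/N2.py | solution
-- ===== SOURCE A (Python) =====
-- def solution(S):
--     N=len(S)
--     counting=[0,0,0] # A,B,N 개수
--     for i in S:
--         if i=='A': counting[0]+=1
--         elif i=='B': counting[1]+=1
--         elif i=='N': counting[2]+=1
--     counting[0]//=3
--     counting[2]//=2
--     return min(counting)
-- ===== SOURCE B (Python) =====
-- def solution(S):
--     # Sort the characters, then locate each letter's block with binary search:
--     # count(c) = bisect(<= c) - bisect(< c) on the sorted character list.
--     T = sorted(S)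
--     def bisect(p):
--         lo, hi = 0, len(T)
--         while lo < hi:
--             mid = (lo + hi) // 2
--             if p(T[mid]):
--                 lo = mid + 1
--             else:
--                 hi = mid
--         return lo
--     a = bisect(lambda x: x <= 'A') - bisect(lambda x: x < 'A')
--     b = bisect(lambda x: x <= 'B') - bisect(lambda x: x < 'B')
--     n = bisect(lambda x: x <= 'N') - bisect(lambda x: x < 'N')
--     return min(a // 3, b, n // 2)
-- ===== Notes on version B (the rewrite author's own statement) =====
-- stated objective: alternative
-- what changed: Replaces A's single-pass three-way tally loop with sort-then-binary-search: sort the characters once and obtain each letter's count as the difference of two binary-search boundaries (bisect(<=c) - bisect(<c)) on the sorted list, then take the min of the scaled counts.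
import Mathlib
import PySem

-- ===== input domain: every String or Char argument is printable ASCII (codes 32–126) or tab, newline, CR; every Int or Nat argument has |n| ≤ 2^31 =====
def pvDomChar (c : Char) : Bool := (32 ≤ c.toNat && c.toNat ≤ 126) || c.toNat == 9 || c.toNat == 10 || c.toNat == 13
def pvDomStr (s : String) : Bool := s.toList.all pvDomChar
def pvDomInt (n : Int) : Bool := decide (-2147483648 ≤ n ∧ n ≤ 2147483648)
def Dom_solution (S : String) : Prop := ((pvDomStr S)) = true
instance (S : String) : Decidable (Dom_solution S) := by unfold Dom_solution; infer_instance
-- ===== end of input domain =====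

-- B replaces A's single-pass tally loop with a different algorithm: sort the characters and read off each letter's count by binary search.

-- ===== PORT A =====
-- single pass over S maintaining the tally (a, b, n); then a //= 3, n //= 2, and min of the three
def solution (S : String) : Int :=
  let c : Int × Int × Int := S.toList.foldl
    (fun (c : Int × Int × Int) i =>
      if i = 'A' then (c.1 + 1, c.2.1, c.2.2)
      else if i = 'B' then (c.1, c.2.1 + 1, c.2.2)
      else if i = 'N' then (c.1, c.2.1, c.2.2 + 1)
      else c) (0, 0, 0)
  let a := PySem.Int.floordiv c.1 3
  let n := PySem.Int.floordiv c.2.2 2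
  -- min(counting): minimum of the three-element list [a, b, n]
  min (min a c.2.1) n

-- ===== PORT B =====
-- B's inner 'while lo < hi' binary-search loop (T[mid] is always in range; getD is exact here)
def bisectGo (t : List Char) (p : Char → Bool) (lo hi : Nat) : Nat :=
  if lo < hi then
    let mid := (lo + hi) / 2
    if p (t.getD mid 'A') then bisectGo t p (mid + 1) hi
    else bisectGo t p lo mid
  else lo
termination_by hi - lo
decreasing_by all_goals omega

def solution_alt (S : String) : Int :=
  let T := PySem.List.sorted S.toList (fun x => x) false
  let bisect := fun (p : Char → Bool) => bisectGo T p 0 T.length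
  let a : Int := (bisect (fun x => x ≤ 'A') : Int) - (bisect (fun x => x < 'A') : Int)
  let b : Int := (bisect (fun x => x ≤ 'B') : Int) - (bisect (fun x => x < 'B') : Int)
  let n : Int := (bisect (fun x => x ≤ 'N') : Int) - (bisect (fun x => x < 'N') : Int)
  min (min (PySem.Int.floordiv a 3) b) (PySem.Int.floordiv n 2)

-- ===== PRECONDITION & SPEC =====
def Spec_solution (S : String) (out : Int) : Prop := out = solution_alt S
instance (S : String) (out : Int) : Decidable (Spec_solution S out) := by unfold Spec_solution; infer_instance

-- ===== CLAIM =====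
def Claim_equal_solution : Prop := ∀ (S : String), Dom_solution S → Spec_solution S (solution S)

-- ===== LEMMAS AND PROOFS =====

-- A's loop computes exactly the three letter counts
theorem tally_eq (l : List Char) (a b n : Int) :
    l.foldl (fun (c : Int × Int × Int) i =>
      if i = 'A' then (c.1 + 1, c.2.1, c.2.2)
      else if i = 'B' then (c.1, c.2.1 + 1, c.2.2)
      else if i = 'N' then (c.1, c.2.1, c.2.2 + 1)
      else c) (a, b, n)
    = (a + l.count 'A', b + l.count 'B', n + l.count 'N') := by
  induction l generalizing a b n with
  | nil => simp
  | cons x t ih =>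
    by_cases hA : x = 'A'
    · subst hA; simp [List.foldl, ih]; ring
    · by_cases hB : x = 'B'
      · subst hB; simp [List.foldl, ih]; omega
      · by_cases hN : x = 'N'
        · subst hN; simp [List.foldl, ih, hA, hB]; omega
        · simp [List.foldl, ih, hA, hB, hN]

-- the binary search returns the split point r: all indices < r satisfy p, none ≥ r do,
-- provided p is "downward closed" along the list (true-region is a prefix)
theorem bisectGo_split (t : List Char) (p : Char → Bool)
    (hmono : ∀ i j, i ≤ j → j < t.length → p (t.getD j 'A') = true → p (t.getD i 'A') = true) :
    ∀ lo hi, lo ≤ hi → hi ≤ t.length →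
    (∀ i, i < lo → p (t.getD i 'A') = true) →
    (∀ i, hi ≤ i → i < t.length → p (t.getD i 'A') = false) →
    (∀ i, i < bisectGo t p lo hi → p (t.getD i 'A') = true) ∧
    (∀ i, bisectGo t p lo hi ≤ i → i < t.length → p (t.getD i 'A') = false) := by
  intro lo hi
  induction hn : hi - lo using Nat.strong_induction_on generalizing lo hi with
  | _ n ih =>
    intro hle hht hlo hhi
    rw [bisectGo]
    by_cases h : lo < hi
    · simp only [h, if_true]
      set mid := (lo + hi) / 2 with hmid
      have hmb : lo ≤ mid ∧ mid < hi := by constructor <;> omega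
      by_cases hp : p (t.getD mid 'A') = true
      · simp only [hp, if_true]
        refine ih (hi - (mid + 1)) (by omega) (mid + 1) hi rfl (by omega) hht ?_ hhi
        intro i hi'
        exact hmono i mid (by omega) (by omega) hp
      · simp only [hp]
        refine ih (mid - lo) (by omega) lo mid rfl (by omega) (by omega) hlo ?_
        intro i hi1 hi2
        by_cases hq : p (t.getD i 'A') = true
        · exact absurd (hmono mid i hi1 hi2 hq) (by simpa using hp)
        · simpa using hq
    · simp only [h, if_false]
      have : lo = hi := by omega
      subst this
      exact ⟨hlo, hhi⟩
  -- (case analysis on Bool already handled)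

-- a prefix-true predicate counts exactly the split point
theorem countP_eq_split (t : List Char) (p : Char → Bool) (r : Nat) (hr : r ≤ t.length)
    (h1 : ∀ i, i < r → p (t.getD i 'A') = true)
    (h2 : ∀ i, r ≤ i → i < t.length → p (t.getD i 'A') = false) :
    t.countP p = r := by
  have hsplit : t = t.take r ++ t.drop r := (List.take_append_drop r t).symm
  rw [hsplit, List.countP_append]
  have hta : (t.take r).countP p = r := by
    rw [List.countP_eq_length.mpr, List.length_take_of_le hr]
    intro x hx
    obtain ⟨i, hi, hx⟩ := List.mem_iff_getElem.mp hx
    have hil : i < r := by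
      have := hi; rw [List.length_take] at this; omega
    have : t.getD i 'A' = x := by
      rw [List.getD_eq_getElem?_getD]
      rw [List.getElem_take] at hx
      simp [List.getElem?_eq_getElem (by omega : i < t.length), hx]
    rw [← this]; exact h1 i hil
  have htd : (t.drop r).countP p = 0 := by
    rw [List.countP_eq_zero]
    intro x hx
    obtain ⟨i, hi, hx⟩ := List.mem_iff_getElem.mp hx
    have hil : r + i < t.length := by
      have := hi; rw [List.length_drop] at this; omega
    have : t.getD (r + i) 'A' = x := by
      rw [List.getD_eq_getElem?_getD]
      rw [List.getElem_drop] at hx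
      simp [List.getElem?_eq_getElem hil, hx]
    have hf := h2 (r + i) (by omega) hil
    rw [this] at hf
    simp [hf]
  omega

-- counting c = countP (≤ c) − countP (< c), in additive form
theorem countP_le_eq_lt_add_count (t : List Char) (c : Char) :
    t.countP (fun x => x ≤ c) = t.countP (fun x => x < c) + t.count c := by
  induction t with
  | nil => simp
  | cons x s ih =>
    by_cases h : x = c
    · subst h
      simp [ih]
      omega
    · rcases lt_or_ge x c with hlt | hge
      · simp [ih, le_of_lt hlt, hlt, h]
        omega
      · have h1 : ¬ x ≤ c := fun hle => h (le_antisymm hle hge)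
        have h2 : ¬ x < c := fun hlt => h1 (le_of_lt hlt)
        simp [ih, h1, h2, h]

-- the loop's result never exceeds hi
theorem bisectGo_le (t : List Char) (p : Char → Bool) :
    ∀ lo hi, lo ≤ hi → bisectGo t p lo hi ≤ hi := by
  intro lo hi
  induction hn : hi - lo using Nat.strong_induction_on generalizing lo hi with
  | _ n ih =>
    intro hle
    rw [bisectGo]
    by_cases h : lo < hi
    · simp only [h, if_true]
      set mid := (lo + hi) / 2 with hmid
      have hmb : lo ≤ mid ∧ mid < hi := by constructor <;> omega
      by_cases hp : p (t.getD mid 'A') = true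
      · simp only [hp, if_true]
        exact ih (hi - (mid + 1)) (by omega) (mid + 1) hi rfl (by omega)
      · simp only [hp]
        exact le_trans (ih (mid - lo) (by omega) lo mid rfl (by omega)) (by omega)
    · simp [h]; omega

-- on the sorted list, bisect(p) for a downward-closed p computes countP p
theorem bisect_counts (l : List Char) (p : Char → Bool)
    (hdc : ∀ x y : Char, x ≤ y → p y = true → p x = true) :
    bisectGo (PySem.List.sorted l (fun x => x) false) p 0
      (PySem.List.sorted l (fun x => x) false).length
      = (PySem.List.sorted l (fun x => x) false).countP p := by
  set t := PySem.List.sorted l (fun x => x) false with ht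
  have hpw : t.Pairwise (fun a b => a ≤ b) := by
    simpa using PySem.List.sorted_pairwise (xs := l) (key := fun x => x)
  have hmono : ∀ i j, i ≤ j → j < t.length → p (t.getD j 'A') = true → p (t.getD i 'A') = true := by
    intro i j hij hj hp
    have hi : i < t.length := by omega
    have hgi : t.getD i 'A' = t[i] := by
      simp [List.getD_eq_getElem?_getD, List.getElem?_eq_getElem hi]
    have hgj : t.getD j 'A' = t[j] := by
      simp [List.getD_eq_getElem?_getD, List.getElem?_eq_getElem hj]
    rcases Nat.eq_or_lt_of_le hij with rfl | hlt
    · exact hp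
    · have hle : t[i] ≤ t[j] := List.pairwise_iff_getElem.mp hpw i j hi hj hlt
      rw [hgi]; rw [hgj] at hp
      exact hdc _ _ hle hp
  obtain ⟨h1, h2⟩ := bisectGo_split t p hmono 0 t.length (Nat.zero_le _) le_rfl
    (by intro i h; omega) (by intro i h1 h2; omega)
  exact (countP_eq_split t p _ (bisectGo_le t p 0 t.length (Nat.zero_le _)) h1 h2).symm

theorem count_sorted (l : List Char) (c : Char) :
    (PySem.List.sorted l (fun x => x) false).count c = l.count c := by
  exact (PySem.List.sorted_perm (xs := l) (key := fun x => x) (rev := false)).count_eq c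

-- ===== VERDICT =====
theorem solution_spec : Claim_equal_solution := by
  intro S _
  unfold Spec_solution solution solution_alt
  simp only [tally_eq, zero_add]
  have hA := bisect_counts S.toList (fun x => x ≤ 'A') (fun x y hxy h => by simpa using le_trans hxy (by simpa using h))
  have hA' := bisect_counts S.toList (fun x => x < 'A') (fun x y hxy h => by simpa using lt_of_le_of_lt hxy (by simpa using h))
  have hB := bisect_counts S.toList (fun x => x ≤ 'B') (fun x y hxy h => by simpa using le_trans hxy (by simpa using h))
  have hB' := bisect_counts S.toList (fun x => x < 'B') (fun x y hxy h => by simpa using lt_of_le_of_lt hxy (by simpa using h))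
  have hN := bisect_counts S.toList (fun x => x ≤ 'N') (fun x y hxy h => by simpa using le_trans hxy (by simpa using h))
  have hN' := bisect_counts S.toList (fun x => x < 'N') (fun x y hxy h => by simpa using lt_of_le_of_lt hxy (by simpa using h))
  simp only [hA, hA', hB, hB', hN, hN', countP_le_eq_lt_add_count, count_sorted]
  push_cast
  ring_nf
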